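-- pv_equiv track=rewrite | github.com/xph9876/RNA-mediated_DSB_repair | 2_graph_processing/common.py | is_alignment_equivalent
-- ===== SOURCE A (Python) =====
-- def is_alignment_equivalent(align_1, align_2):
--   if len(align_1) != len(align_2):
--     return False
--   for i in range(len(align_1)):
--     if align_1[i] != align_2[i]:
--       if (align_1[i] == '-') or (align_2[i] == '-'):
--         return False
--   return True
-- ===== SOURCE B (Python) =====
-- def is_alignment_equivalent(align_1, align_2):
--   return [c == '-' for c in align_1] == [c == '-' for c in align_2]
-- ===== Notes on version B (the rewrite author's own statement) =====
-- stated objective: simpler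
-- what changed: B builds a gap-mask (list of 'is this char a gap') for each string and compares the two masks for equality, replacing A's indexed loop with a per-character mismatch-then-gap guard and a separate length check.
import Mathlib
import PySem

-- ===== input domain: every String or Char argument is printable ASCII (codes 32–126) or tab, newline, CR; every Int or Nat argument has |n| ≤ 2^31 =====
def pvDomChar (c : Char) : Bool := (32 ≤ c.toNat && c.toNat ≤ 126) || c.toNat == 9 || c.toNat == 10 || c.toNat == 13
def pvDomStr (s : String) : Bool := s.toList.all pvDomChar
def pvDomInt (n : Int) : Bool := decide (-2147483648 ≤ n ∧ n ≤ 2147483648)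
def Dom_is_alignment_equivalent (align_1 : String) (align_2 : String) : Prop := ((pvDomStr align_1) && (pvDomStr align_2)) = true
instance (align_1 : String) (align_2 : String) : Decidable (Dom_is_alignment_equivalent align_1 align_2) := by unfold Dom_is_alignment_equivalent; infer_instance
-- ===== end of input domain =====

-- ===== PORT A =====
-- B builds gap-masks and compares them; A loops with a per-character guard. Objective: simpler.
-- helper: A's index loop, transcribed as the paired walk over the (equal-length) character lists
def isAlignEquivLoop : List Char → List Char → Bool
  | c1 :: t1, c2 :: t2 =>
      if c1 ≠ c2 then
        if c1 = '-' ∨ c2 = '-' then false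
        else isAlignEquivLoop t1 t2
      else isAlignEquivLoop t1 t2
  | _, _ => true

def is_alignment_equivalent (align_1 : String) (align_2 : String) : Bool :=
  if align_1.toList.length ≠ align_2.toList.length then false
  else isAlignEquivLoop align_1.toList align_2.toList

-- ===== PORT B =====
def is_alignment_equivalent_alt (align_1 : String) (align_2 : String) : Bool :=
  (align_1.toList.map (fun c => c == '-')) == (align_2.toList.map (fun c => c == '-'))

-- ===== PRECONDITION & SPEC =====
def Spec_is_alignment_equivalent (align_1 : String) (align_2 : String) (out : Bool) : Prop := out = is_alignment_equivalent_alt align_1 align_2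
instance (align_1 : String) (align_2 : String) (out : Bool) : Decidable (Spec_is_alignment_equivalent align_1 align_2 out) := by unfold Spec_is_alignment_equivalent; infer_instance

-- ===== CLAIM (what is proved, stated in full; the proofs are below) =====
def Claim_equal_is_alignment_equivalent : Prop := ∀ (align_1 : String) (align_2 : String), Dom_is_alignment_equivalent align_1 align_2 → Spec_is_alignment_equivalent align_1 align_2 (is_alignment_equivalent align_1 align_2)

-- ===== LEMMAS AND PROOFS =====

theorem loop_eq_masks (l1 : List Char) : ∀ l2 : List Char, l1.length = l2.length →
    isAlignEquivLoop l1 l2 = ((l1.map (fun c => c == '-')) == (l2.map (fun c => c == '-'))) := by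
  induction l1 with
  | nil => intro l2 h; cases l2 with
    | nil => rfl
    | cons c t => simp at h
  | cons c1 t1 ih =>
    intro l2 h
    cases l2 with
    | nil => simp at h
    | cons c2 t2 =>
      simp only [List.length_cons, Nat.add_right_cancel_iff] at h
      by_cases hc : c1 = c2
      · subst hc
        simp [isAlignEquivLoop, ih t2 h]
      · by_cases hg : c1 = '-' ∨ c2 = '-'
        · have hne : (c1 == '-') ≠ (c2 == '-') := by
            rcases hg with h1 | h2
            · subst h1; simp [beq_iff_eq]; intro h'; exact hc h'.symm
            · subst h2; simp [beq_iff_eq]; exact hc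
          show (if c1 ≠ c2 then if c1 = '-' ∨ c2 = '-' then false else isAlignEquivLoop t1 t2
              else isAlignEquivLoop t1 t2) = _
          rw [if_pos hc, if_pos hg,List.map_cons, List.map_cons, List.cons_beq_cons]
          symm
          rw [Bool.and_eq_false_iff]
          exact Or.inl (beq_eq_false_iff_ne.mpr hne)
        · show (if c1 ≠ c2 then if c1 = '-' ∨ c2 = '-' then false else isAlignEquivLoop t1 t2
              else isAlignEquivLoop t1 t2) = _
          rw [if_pos hc, if_neg hg]
          push Not at hg
          rw [ih t2 h, List.map_cons, List.map_cons, List.cons_beq_cons]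
          have : (c1 == '-') = (c2 == '-') := by
            simp [hg.1, hg.2]
          simp [this]

theorem masks_len_ne (l1 l2 : List Char) (h : l1.length ≠ l2.length) :
    ((l1.map (fun c => c == '-')) == (l2.map (fun c => c == '-'))) = false := by
  rw [Bool.eq_false_iff]
  intro hb
  have := eq_of_beq hb
  have := congrArg List.length this
  simp at this
  exact h this

-- ===== VERDICT (by name: the statement is the Claim_ definition above) =====
theorem is_alignment_equivalent_spec : Claim_equal_is_alignment_equivalent := by
  intro a1 a2 _
  unfold Spec_is_alignment_equivalent is_alignment_equivalent is_alignment_equivalent_alt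
  by_cases h : a1.toList.length = a2.toList.length
  · rw [if_neg (by simpa using h), loop_eq_masks _ _ h]
  · rw [if_pos (by simpa using h), masks_len_ne _ _ h]
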